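-- pv_equiv track=rewrite | github.com/HoulsSoul1/Proyecto-ASCII-UDG | Proyecto ASCII.py | dibujar_cuadrado
-- ===== SOURCE A (Python) =====
-- def dibujar_cuadrado(lado):
--     resultado = ""
--     for fila in range(lado):
--         for columna in range(lado):
--             if fila == 0 or fila == lado - 1 or columna == 0 or columna == lado - 1:
--                 resultado += "* "
--             else:
--                 resultado += "  "
--         resultado += "\n"
--     return resultado
-- ===== SOURCE B (Python) =====
-- def dibujar_cuadrado(lado):
--     if lado <= 0:
--         return ""
--     borde = "* " * lado + "\n"
--     if lado <= 2:
--         return borde * lado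
--     medio = "* " + "  " * (lado - 2) + "* \n"
--     return borde + medio * (lado - 2) + borde
-- ===== Notes on version B (the rewrite author's own statement) =====
-- stated objective: simpler
-- what changed: B builds each full row by formula (border row = '* '*lado, interior row = '* '+' '*(lado-2)+'* ') with string repetition, removing A's per-cell inner loop and its four-part border test.
import Mathlib
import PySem

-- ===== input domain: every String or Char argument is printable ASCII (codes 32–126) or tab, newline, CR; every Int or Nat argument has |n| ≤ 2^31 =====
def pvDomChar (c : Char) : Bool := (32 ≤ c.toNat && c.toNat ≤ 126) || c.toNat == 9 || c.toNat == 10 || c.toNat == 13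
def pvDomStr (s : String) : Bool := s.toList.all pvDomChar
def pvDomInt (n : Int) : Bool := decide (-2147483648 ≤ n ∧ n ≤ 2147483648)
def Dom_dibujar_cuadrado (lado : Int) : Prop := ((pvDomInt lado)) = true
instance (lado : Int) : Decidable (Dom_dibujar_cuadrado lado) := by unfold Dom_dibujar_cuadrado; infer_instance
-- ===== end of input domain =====

-- B replaces A's per-cell nested loop by building whole rows from formulas ('* '*lado border
-- rows, '* '+'  '*(lado-2)+'* ' interior rows) with string repetition; objective: simpler.
-- Both ports model Python strings as List Char (PySem convention) and convert at the return.

-- ===== PORT A =====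
def dibujar_cuadrado (lado : Int) : String :=
  String.ofList
    ((PySem.List.pyRange 0 lado 1).foldl (fun resultado fila =>
      ((PySem.List.pyRange 0 lado 1).foldl (fun res columna =>
        if fila = 0 ∨ fila = lado - 1 ∨ columna = 0 ∨ columna = lado - 1
        then res ++ ['*', ' ']
        else res ++ [' ', ' ']) resultado) ++ ['\n']) [])

-- ===== PORT B =====
-- Python's  s * n  on strings (empty for n ≤ 0), on the List Char model.
def pyStrMulChars (s : List Char) (n : Int) : List Char :=
  (List.replicate n.toNat s).flatten

def dibujar_cuadrado_alt (lado : Int) : String :=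
  if lado ≤ 0 then "" else
  let borde := pyStrMulChars ['*', ' '] lado ++ ['\n']
  if lado ≤ 2 then String.ofList (pyStrMulChars borde lado)
  else
    let medio := ['*', ' '] ++ pyStrMulChars [' ', ' '] (lado - 2) ++ ['*', ' ', '\n']
    String.ofList (borde ++ pyStrMulChars medio (lado - 2) ++ borde)

-- ===== PRECONDITION & SPEC =====
def Spec_dibujar_cuadrado (lado : Int) (out : String) : Prop := out = dibujar_cuadrado_alt lado
instance (lado : Int) (out : String) : Decidable (Spec_dibujar_cuadrado lado out) := by unfold Spec_dibujar_cuadrado; infer_instance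

-- ===== CLAIM (what is proved, stated in full; the proofs are below) =====
def Claim_equal_dibujar_cuadrado : Prop := ∀ (lado : Int), Dom_dibujar_cuadrado lado → Spec_dibujar_cuadrado lado (dibujar_cuadrado lado)

-- ===== LEMMAS AND PROOFS =====

-- one cell of A's inner loop
def pvCell (lado fila columna : Int) : List Char :=
  if fila = 0 ∨ fila = lado - 1 ∨ columna = 0 ∨ columna = lado - 1
  then ['*', ' '] else [' ', ' ']

-- one row of A (without the trailing newline)
def pvRow (lado fila : Int) : List Char :=
  (PySem.List.pyRange 0 lado 1).flatMap (pvCell lado fila)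

theorem pvA_eq_flatMap (lado : Int) :
    dibujar_cuadrado lado
      = String.ofList ((PySem.List.pyRange 0 lado 1).flatMap
          (fun fila => pvRow lado fila ++ ['\n'])) := by
  unfold dibujar_cuadrado
  congr 1
  rw [PySem.List.foldl_congr_mem
      (g := fun res fila => res ++ (pvRow lado fila ++ ['\n']))
      (h := by
        intro acc fila _
        have hin : (PySem.List.pyRange 0 lado 1).foldl (fun res columna =>
            if fila = 0 ∨ fila = lado - 1 ∨ columna = 0 ∨ columna = lado - 1
            then res ++ ['*', ' '] else res ++ [' ', ' ']) acc
            = acc ++ pvRow lado fila := by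
          rw [show (fun res columna =>
              if fila = 0 ∨ fila = lado - 1 ∨ columna = 0 ∨ columna = lado - 1
              then res ++ ['*', ' '] else res ++ [' ', ' '])
              = fun (res : List Char) columna => res ++ pvCell lado fila columna from by
            funext res columna; unfold pvCell; split <;> rfl]
          exact PySem.List.foldl_append_eq_flatMap _ _ _
        rw [hin, List.append_assoc])]
  exact PySem.List.foldl_append_eq_flatMap _ _ _

theorem pvRange_split (lado : Int) (h : 2 ≤ lado) :
    PySem.List.pyRange 0 lado 1
      = 0 :: (PySem.List.pyRange 1 (lado - 1) 1 ++ [lado - 1]) := by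
  rw [PySem.List.pyRange_one_cons (by omega : (0:Int) < lado)]
  norm_num
  rw [PySem.List.pyRange_one_append 1 (lado - 1) lado (by omega) (by omega)]
  have hs := PySem.List.pyRange_one_singleton (lado - 1)
  rw [show lado - 1 + 1 = lado from by omega] at hs
  rw [hs]

theorem pvRow_border (lado fila : Int) (h : fila = 0 ∨ fila = lado - 1) :
    pvRow lado fila = (List.replicate lado.toNat ['*', ' ']).flatten := by
  unfold pvRow
  rw [List.flatMap_def]
  rw [List.map_congr_left (fun c _ => by
    unfold pvCell
    rw [if_pos (by tauto)] : ∀ c ∈ PySem.List.pyRange 0 lado 1,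
      pvCell lado fila c = ['*', ' '])]
  rw [List.map_const', PySem.List.length_pyRange_one]
  norm_num

theorem pvRow_mid (lado fila : Int) (h0 : 0 < fila) (h1 : fila < lado - 1) :
    pvRow lado fila
      = ['*', ' '] ++ (List.replicate (lado - 2).toNat [' ', ' ']).flatten ++ ['*', ' '] := by
  unfold pvRow
  rw [pvRange_split lado (by omega)]
  rw [List.flatMap_cons, List.flatMap_append, List.flatMap_cons, List.flatMap_nil]
  have hc0 : pvCell lado fila 0 = ['*', ' '] := by unfold pvCell; rw [if_pos (by tauto)]
  have hcl : pvCell lado fila (lado - 1) = ['*', ' '] := by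
    unfold pvCell; rw [if_pos (by tauto)]
  rw [hc0, hcl]
  rw [List.flatMap_def]
  rw [List.map_congr_left (fun c hc => by
    have hm := (PySem.List.mem_pyRange_one (x := c) (a := 1) (b := lado - 1)).1 hc
    unfold pvCell
    rw [if_neg (by omega)] : ∀ c ∈ PySem.List.pyRange 1 (lado - 1) 1,
      pvCell lado fila c = [' ', ' '])]
  rw [List.map_const', PySem.List.length_pyRange_one]
  rw [show (lado - 1 - 1).toNat = (lado - 2).toNat from by omega]
  simp

-- ===== VERDICT (by name: the statement is the Claim_ definition above) =====
theorem dibujar_cuadrado_spec : Claim_equal_dibujar_cuadrado := by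
  intro lado _
  unfold Spec_dibujar_cuadrado
  by_cases h0 : lado ≤ 0
  · simp [dibujar_cuadrado, dibujar_cuadrado_alt, PySem.List.pyRange_one_eq_nil h0, h0]
  · by_cases h1 : lado = 1
    · subst h1; decide
    · by_cases h2 : lado = 2
      · subst h2; decide
      · -- lado ≥ 3
        rw [pvA_eq_flatMap]
        rw [pvRange_split lado (by omega)]
        rw [List.flatMap_cons, List.flatMap_append, List.flatMap_cons, List.flatMap_nil]
        rw [pvRow_border lado 0 (Or.inl rfl), pvRow_border lado (lado - 1) (Or.inr rfl)]
        rw [List.flatMap_def]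
        rw [List.map_congr_left (fun fila hf => by
          have hm := (PySem.List.mem_pyRange_one (x := fila) (a := 1) (b := lado - 1)).1 hf
          rw [pvRow_mid lado fila (by omega) (by omega)] :
            ∀ fila ∈ PySem.List.pyRange 1 (lado - 1) 1,
              pvRow lado fila ++ ['\n']
                = (['*', ' '] ++ (List.replicate (lado - 2).toNat [' ', ' ']).flatten
                    ++ ['*', ' ']) ++ ['\n'])]
        rw [List.map_const', PySem.List.length_pyRange_one]
        rw [show (lado - 1 - 1).toNat = (lado - 2).toNat from by omega]
        unfold dibujar_cuadrado_alt
        rw [if_neg h0, if_neg (by omega : ¬ lado ≤ 2)]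
        unfold pyStrMulChars
        simp [List.append_assoc]
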